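-- pv_equiv track=rewrite | github.com/Miro96/nova-rag | src/nova_rag/docs_generator.py | _truncate_source
-- ===== SOURCE A (Python) =====
-- _MAX_SOURCE_CHARS = 100_000
--
-- def _truncate_source(source: str, max_chars: int = _MAX_SOURCE_CHARS) -> str:
--     """Truncate source code to fit within prompt limits."""
--     if len(source) <= max_chars:
--         return source
--     lines = source.splitlines()
--     result = []
--     total = 0
--     for line in lines:
--         if total + len(line) + 1 > max_chars:
--             break
--         result.append(line)
--         total += len(line) + 1
--     remaining = len(lines) - len(result)
--     result.append(f"\n... ({remaining} more lines omitted for brevity)")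
--     return "\n".join(result)
-- ===== SOURCE B (Python) =====
-- _MAX_SOURCE_CHARS = 100_000
--
--
-- def _truncate_source(source: str, max_chars: int = _MAX_SOURCE_CHARS) -> str:
--     """Truncate source code to fit within prompt limits."""
--     if len(source) <= max_chars:
--         return source
--     lines = source.splitlines()
--     # prefix[i] = total cost (len(line)+1) of the first i+1 lines
--     prefix = []
--     run = 0
--     for line in lines:
--         run += len(line) + 1
--         prefix.append(run)
--     # number of lines kept = how many prefix costs fit in the budget
--     k = sum(1 for p in prefix if p <= max_chars)
--     kept = lines[:k]
--     kept.append(f"\n... ({len(lines) - k} more lines omitted for brevity)")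
--     return "\n".join(kept)
-- ===== Notes on version B (the rewrite author's own statement) =====
-- stated objective: alternative
-- what changed: Replaces A's single greedy accumulate-and-break loop over lines with a prefix-sum table of line costs plus a count of how many prefixes fit the budget, then a slice lines[:k]; correctness relies on the prefix sums being monotone.
import Mathlib
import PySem

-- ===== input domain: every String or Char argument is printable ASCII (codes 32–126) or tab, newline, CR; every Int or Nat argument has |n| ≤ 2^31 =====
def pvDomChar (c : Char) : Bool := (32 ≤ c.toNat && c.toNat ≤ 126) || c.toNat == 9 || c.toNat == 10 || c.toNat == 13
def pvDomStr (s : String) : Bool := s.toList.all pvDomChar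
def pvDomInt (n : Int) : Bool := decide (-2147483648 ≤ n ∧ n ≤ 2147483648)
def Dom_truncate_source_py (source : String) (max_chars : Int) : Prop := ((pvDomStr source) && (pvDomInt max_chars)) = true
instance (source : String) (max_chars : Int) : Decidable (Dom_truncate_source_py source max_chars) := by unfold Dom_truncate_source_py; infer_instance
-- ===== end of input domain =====

-- B replaces A's greedy accumulate-and-break loop with a prefix-sum cost table, a count of
-- the prefixes that fit the budget, and a slice; same return value, no speed claim.

-- ===== PORT A =====
-- the 'for line in lines: … break' loop, with the growing result kept reversed (append = cons)
def truncALoop (max_chars : Int) : List String → List String → Int → List String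
  | [], result, _ => result.reverse
  | line :: rest, result, total =>
      if total + (PySem.Str.len line : Int) + 1 > max_chars then result.reverse
      else truncALoop max_chars rest (line :: result) (total + (PySem.Str.len line : Int) + 1)

def truncate_source_py (source : String) (max_chars : Int) : String :=
  if (PySem.Str.len source : Int) ≤ max_chars then source
  else
    let lines := PySem.Str.splitlines source
    let result := truncALoop max_chars lines [] 0
    let remaining : Int := (lines.length : Int) - (result.length : Int)
    PySem.Str.join "\n" (result ++ ["\n... (" ++ PySem.Int.toStr remaining ++ " more lines omitted for brevity)"])

-- ===== PORT B =====
-- Source B's prefix-sum loop (append = cons on a reversed accumulator)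
def prefixLoop : List String → Int → List Int → List Int
  | [], _, prefix_ => prefix_.reverse
  | line :: rest, run, prefix_ =>
      prefixLoop rest (run + (PySem.Str.len line : Int) + 1) ((run + (PySem.Str.len line : Int) + 1) :: prefix_)

def truncate_source_py_alt (source : String) (max_chars : Int) : String :=
  if (PySem.Str.len source : Int) ≤ max_chars then source
  else
    let lines := PySem.Str.splitlines source
    let prefix_ := prefixLoop lines 0 []
    let k := prefix_.countP (fun p => p ≤ max_chars)
    let kept := lines.take k ++ ["\n... (" ++ PySem.Int.toStr ((lines.length : Int) - (k : Int)) ++ " more lines omitted for brevity)"]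
    PySem.Str.join "\n" kept

-- ===== PRECONDITION & SPEC =====
def Spec_truncate_source_py (source : String) (max_chars : Int) (out : String) : Prop := out = truncate_source_py_alt source max_chars
instance (source : String) (max_chars : Int) (out : String) : Decidable (Spec_truncate_source_py source max_chars out) := by unfold Spec_truncate_source_py; infer_instance

-- ===== CLAIM (what is proved, stated in full; the proofs are below) =====
def Claim_equal_truncate_source_py : Prop := ∀ (source : String) (max_chars : Int), Dom_truncate_source_py source max_chars → Spec_truncate_source_py source max_chars (truncate_source_py source max_chars)

-- ===== LEMMAS AND PROOFS =====

-- straight-line form of the prefix-sum loop, for reasoning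
def cumsum : List String → Int → List Int
  | [], _ => []
  | line :: rest, run => (run + (PySem.Str.len line : Int) + 1) :: cumsum rest (run + (PySem.Str.len line : Int) + 1)

theorem prefixLoop_eq (lines : List String) : ∀ (run : Int) (acc : List Int),
    prefixLoop lines run acc = acc.reverse ++ cumsum lines run := by
  induction lines with
  | nil => intro run acc; simp [prefixLoop, cumsum]
  | cons line rest ih => intro run acc; simp [prefixLoop, cumsum, ih]

theorem cumsum_all_gt (max_chars : Int) (lines : List String) : ∀ (run : Int), max_chars < run →
    (cumsum lines run).countP (fun p => p ≤ max_chars) = 0 := by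
  induction lines with
  | nil => intro run _; simp [cumsum]
  | cons line rest ih =>
      intro run h
      have hlen : (0 : Int) ≤ (PySem.Str.len line : Int) := Int.natCast_nonneg _
      have h2 : max_chars < run + (PySem.Str.len line : Int) + 1 := by omega
      rw [cumsum, List.countP_cons, ih _ h2,
        decide_eq_false (by omega : ¬ (run + (PySem.Str.len line : Int) + 1 ≤ max_chars))]
      simp

theorem truncALoop_eq (max_chars : Int) (lines : List String) :
    ∀ (acc : List String) (total : Int),
    truncALoop max_chars lines acc total =
      acc.reverse ++ lines.take ((cumsum lines total).countP (fun p => p ≤ max_chars)) := by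
  induction lines with
  | nil => intro acc total; simp [truncALoop, cumsum]
  | cons line rest ih =>
      intro acc total
      rw [truncALoop, cumsum, List.countP_cons]
      by_cases h : total + (PySem.Str.len line : Int) + 1 > max_chars
      · rw [if_pos h, cumsum_all_gt max_chars rest _ h, decide_eq_false (not_le.mpr h)]
        simp
      · rw [if_neg h, decide_eq_true (not_lt.mp h), ih (line :: acc)]
        simp [List.take_succ_cons]

theorem cumsum_length (lines : List String) : ∀ run, (cumsum lines run).length = lines.length := by
  induction lines with
  | nil => intro _; simp [cumsum]
  | cons line rest ih => intro run; simp [cumsum, ih]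

-- ===== VERDICT (by name: the statement is the Claim_ definition above) =====
theorem truncate_source_py_spec : Claim_equal_truncate_source_py := by
  intro source max_chars _
  simp only [Spec_truncate_source_py, truncate_source_py, truncate_source_py_alt,
    truncALoop_eq, prefixLoop_eq, List.reverse_nil, List.nil_append]
  split_ifs with h
  · rfl
  · have hkle : (cumsum (PySem.Str.splitlines source) 0).countP (fun p => decide (p ≤ max_chars))
        ≤ (PySem.Str.splitlines source).length :=
      le_trans List.countP_le_length (le_of_eq (cumsum_length _ 0))
    rw [List.length_take, Nat.min_eq_left hkle]
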